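-- pv_equiv track=rewrite | github.com/jmason86/MinXSS_Beacon_Decoder | connect_serial_decode_kiss.py | hydra_fletcher16
-- ===== SOURCE A (Python) =====
-- def hydra_fletcher16(packet):
--     cka = 0
--     ckb = 0
--     for byte in packet:
--         #log.debug(byte)
--         cka += byte
--         cka %= 255
--         ckb += cka
--         ckb %= 255
--     #log.debug(cka)
--     #log.debug(ckb)
--     return [ckb,cka]
-- ===== SOURCE B (Python) =====
-- def hydra_fletcher16(packet):
--     # Closed form: cka is the byte total mod 255; ckb is the weighted total
--     # where byte i (0-based) carries weight len(packet)-i, i.e. the sum of all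
--     # prefix sums, reduced mod 255 once.
--     n = len(packet)
--     cka = sum(packet) % 255
--     ckb = sum((n - i) * byte for i, byte in enumerate(packet)) % 255
--     return [ckb, cka]
-- ===== Notes on version B (the rewrite author's own statement) =====
-- stated objective: alternative
-- what changed: B replaces A's stateful loop (two interleaved running sums reduced mod 255 each iteration) by two closed-form aggregations: the plain byte total and a position-weighted total with weight len(packet)-i, each reduced mod 255 once.
import Mathlib
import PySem

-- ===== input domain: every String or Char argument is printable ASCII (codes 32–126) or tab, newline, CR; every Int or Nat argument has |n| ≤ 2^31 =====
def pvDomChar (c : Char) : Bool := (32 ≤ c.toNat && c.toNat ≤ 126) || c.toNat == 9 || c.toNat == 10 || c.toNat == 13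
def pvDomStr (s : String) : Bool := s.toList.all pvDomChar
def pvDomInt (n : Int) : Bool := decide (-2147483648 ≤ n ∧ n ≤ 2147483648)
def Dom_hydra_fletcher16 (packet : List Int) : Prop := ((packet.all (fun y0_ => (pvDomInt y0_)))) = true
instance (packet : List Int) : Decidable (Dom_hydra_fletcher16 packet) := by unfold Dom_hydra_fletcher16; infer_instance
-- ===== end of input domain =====

-- B computes the checksum by two closed-form aggregations (byte total and position-weighted total, each reduced mod 255 once) instead of A's stateful per-byte loop (alternative decomposition, same cost).


-- ===== PORT A =====
-- A: per-byte, cka += byte; cka %= 255; ckb += cka; ckb %= 255  (Python % with positive divisor = PySem.Int.mod)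
def hydra_fletcher16 (packet : List Int) : List Int :=
  let st := packet.foldl
    (fun (p : Int × Int) (byte : Int) =>
      let cka := PySem.Int.mod (p.1 + byte) 255
      let ckb := PySem.Int.mod (p.2 + cka) 255
      (cka, ckb)) (0, 0)
  [st.2, st.1]

-- ===== PORT B =====
-- B: cka = sum(packet) % 255; ckb = sum((n - i) * byte for i, byte in enumerate(packet)) % 255
def hydra_fletcher16_alt (packet : List Int) : List Int :=
  let n : Int := packet.length
  let cka := PySem.Int.mod (packet.foldl (fun acc byte => acc + byte) 0) 255
  let ckb := PySem.Int.mod ((PySem.List.enumerate packet).foldl (fun acc p => acc + (n - p.1) * p.2) 0) 255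
  [ckb, cka]

-- ===== PRECONDITION & SPEC =====
def Spec_hydra_fletcher16 (packet : List Int) (out : List Int) : Prop := out = hydra_fletcher16_alt packet
instance (packet : List Int) (out : List Int) : Decidable (Spec_hydra_fletcher16 packet out) := by unfold Spec_hydra_fletcher16; infer_instance

-- ===== CLAIM (what is proved, stated in full; the proofs are below) =====
def Claim_equal_hydra_fletcher16 : Prop := ∀ (packet : List Int), Dom_hydra_fletcher16 packet → Spec_hydra_fletcher16 packet (hydra_fletcher16 packet)

-- ===== LEMMAS AND PROOFS =====
-- Weighted sum of an enumeration is invariant under shifting both the weight base and the start index.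
theorem enumWeight_shift (l : List Int) : ∀ (n s : Int),
    ((PySem.List.enumerate l s).map (fun p => (n - p.1) * p.2)).sum
    = ((PySem.List.enumerate l (s + 1)).map (fun p => ((n + 1) - p.1) * p.2)).sum := by
  induction l with
  | nil => intro n s; simp [PySem.List.enumerate_nil]
  | cons x tl ih =>
      intro n s
      simp only [PySem.List.enumerate_cons, List.map_cons, List.sum_cons]
      rw [ih n (s + 1)]
      ring_nf

-- Loop invariant for A's fold: from a state reduced mod 255, the final state is
-- (total + a) mod 255 and (b + len·a + weighted total) mod 255.
theorem fletcher_fold_closed (l : List Int) : ∀ (a b : Int),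
    l.foldl (fun (p : Int × Int) (byte : Int) =>
        ((p.1 + byte) % 255, (p.2 + (p.1 + byte) % 255) % 255)) (a % 255, b % 255)
    = ((a + l.sum) % 255,
       (b + (l.length : Int) * a
          + ((PySem.List.enumerate l 0).map (fun p => ((l.length : Int) - p.1) * p.2)).sum) % 255) := by
  induction l with
  | nil => intro a b; simp [PySem.List.enumerate_nil]
  | cons x tl ih =>
      intro a b
      simp only [List.foldl_cons]
      have h1 : (a % 255 + x) % 255 = (a + x) % 255 := by omega
      have h2 : (b % 255 + (a + x) % 255) % 255 = (b + a + x) % 255 := by omega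
      rw [h1, h2]
      have := ih (a + x) (b + a + x)
      rw [this]
      have hw : ((PySem.List.enumerate (x :: tl) 0).map
            (fun p => (((x :: tl).length : Int) - p.1) * p.2)).sum
          = ((tl.length : Int) + 1) * x
            + ((PySem.List.enumerate tl 0).map (fun p => ((tl.length : Int) - p.1) * p.2)).sum := by
        simp only [PySem.List.enumerate_cons, List.map_cons, List.sum_cons, List.length_cons]
        push_cast
        have hs := enumWeight_shift tl (tl.length : Int) 0
        norm_num at hs
        rw [← hs]
        ring
      refine Prod.ext ?_ ?_
      · simp; ring_nf
      · simp only [hw]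
        have : b + a + x + (tl.length : Int) * (a + x)
              + ((PySem.List.enumerate tl 0).map (fun p => ((tl.length : Int) - p.1) * p.2)).sum
            = b + ((x :: tl).length : Int) * a
              + (((tl.length : Int) + 1) * x
                + ((PySem.List.enumerate tl 0).map (fun p => ((tl.length : Int) - p.1) * p.2)).sum) := by
          simp [List.length_cons]; ring
        simp only [this]

-- ===== VERDICT (by name: the statement is the Claim_ definition above) =====
theorem hydra_fletcher16_spec : Claim_equal_hydra_fletcher16 := by
  intro packet _
  unfold Spec_hydra_fletcher16 hydra_fletcher16 hydra_fletcher16_alt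
  simp only [PySem.Int.mod_eq_emod_of_pos (show (0:Int) < 255 by omega)]
  have hA := fletcher_fold_closed packet 0 0
  simp only [show ((0:Int) % 255) = 0 from by decide, zero_add, mul_zero, add_zero] at hA
  rw [hA]
  simp only [PySem.List.foldl_add, zero_add, List.sum_eq_foldl]
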